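-- pv_equiv track=rewrite | github.com/AruzhanBazarbai/web_development | lab7/1.py | f_even
-- ===== SOURCE A (Python) =====
-- def f_even(s,res,i):
--     if i==len(s):
--         return res
--     if i==(len(s)//2-1):
--         res+=s[i]
--
--     elif i>=(len(s)//2):
--         res+=s[i]+')'
--     else:
--         res+=s[i]+'('
--     return f_even(s,res,i+1)
-- ===== SOURCE B (Python) =====
-- def f_even(s, res, i):
--     n = len(s)
--     h = n // 2
--     return res + ''.join(
--         s[j] + ('' if j == h - 1 else ')' if j >= h else '(')
--         for j in range(i, n))
-- ===== Notes on version B (the rewrite author's own statement) =====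
-- stated objective: simpler
-- what changed: Replaces A's self-recursion with accumulator string concatenation by a single non-recursive join over range(i, len(s)) of per-character chunks (character plus closed-form paren suffix).
import Mathlib
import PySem

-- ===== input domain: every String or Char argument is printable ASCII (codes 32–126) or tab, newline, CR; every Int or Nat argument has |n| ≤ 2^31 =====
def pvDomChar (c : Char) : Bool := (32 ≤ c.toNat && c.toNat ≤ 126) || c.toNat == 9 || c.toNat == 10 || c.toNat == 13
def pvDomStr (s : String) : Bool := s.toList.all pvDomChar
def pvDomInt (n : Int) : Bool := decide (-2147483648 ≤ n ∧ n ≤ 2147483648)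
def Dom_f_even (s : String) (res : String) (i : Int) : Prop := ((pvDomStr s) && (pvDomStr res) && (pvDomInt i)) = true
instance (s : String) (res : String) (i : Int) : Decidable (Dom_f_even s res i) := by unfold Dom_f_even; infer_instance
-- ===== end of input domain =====

-- B replaces A's recursive accumulator cascade by a single join over range(i, len(s)) with a
-- per-character suffix (objective: simpler; return-value equivalence on Pre_, A's raises excluded).

-- ===== PORT A =====
-- literal port of A's recursion; the `none` arm is where Python raises IndexError (outside Pre_)
def f_even (s : String) (res : String) (i : Int) : String :=
  if i = PySem.Str.len s then res
  else if hlt : i < PySem.Str.len s then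
    match PySem.Str.pyGet? s i with
    | none => res
    | some c =>
      let res' :=
        if i = PySem.Int.floordiv (PySem.Str.len s) 2 - 1 then res ++ String.ofList [c]
        else if PySem.Int.floordiv (PySem.Str.len s) 2 ≤ i then res ++ String.ofList [c, ')']
        else res ++ String.ofList [c, '(']
      f_even s res' (i + 1)
  else res
termination_by (PySem.Str.len s - i).toNat
decreasing_by omega

-- ===== PORT B =====
-- the generator's body; an out-of-range j (Python: IndexError inside the genexp) yields []
def pvChunk (s : String) (h : Int) (j : Int) : List Char :=
  match PySem.Str.pyGet? s j with
  | none => []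
  | some c => c :: (if j = h - 1 then [] else if h ≤ j then [')'] else ['('])

def f_even_alt (s : String) (res : String) (i : Int) : String :=
  let n := PySem.Str.len s
  let h := PySem.Int.floordiv n 2
  res ++ String.ofList (((PySem.List.pyRange i n 1).map (pvChunk s h)).flatten)

-- ===== PRECONDITION & SPEC =====
-- Pre_ excludes exactly the inputs on which Python A raises: i outside [-len(s), len(s)]
-- gives IndexError (via negative-index wraparound, s[i] is valid down to i = -len(s)).
def Pre_f_even (s : String) (res : String) (i : Int) : Prop :=
  -PySem.Str.len s ≤ i ∧ i ≤ PySem.Str.len s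
instance (s : String) (res : String) (i : Int) : Decidable (Pre_f_even s res i) := by
  unfold Pre_f_even; infer_instance

def pvWitness_f_even : String × String × Int := ("abcd", "", 0)

def Spec_f_even (s : String) (res : String) (i : Int) (out : String) : Prop := out = f_even_alt s res i
instance (s : String) (res : String) (i : Int) (out : String) : Decidable (Spec_f_even s res i out) := by unfold Spec_f_even; infer_instance

-- ===== CLAIM (what is proved, stated in full; the proofs are below) =====
def Claim_equal_f_even : Prop := ∀ (s : String) (res : String) (i : Int), Dom_f_even s res i → Pre_f_even s res i → Spec_f_even s res i (f_even s res i)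

-- ===== LEMMAS AND PROOFS =====

theorem mk_append_mk (a b : List Char) : String.ofList a ++ String.ofList b = String.ofList (a ++ b) := String.ofList_append.symm

theorem f_even_eq_alt (s res : String) (i : Int)
    (hlo : -PySem.Str.len s ≤ i) (hhi : i ≤ PySem.Str.len s) :
    f_even s res i = f_even_alt s res i := by
  generalize hk : (PySem.Str.len s - i).toNat = k
  induction k generalizing res i with
  | zero =>
    have hi : i = PySem.Str.len s := by omega
    rw [f_even, f_even_alt]
    simp [hi, PySem.List.pyRange_one_eq_nil (le_refl _)]
  | succ k ih =>
    have hlt : i < PySem.Str.len s := by omega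
    have hne : i ≠ PySem.Str.len s := by omega
    have hsome : ∃ c, PySem.Str.pyGet? s i = some c := by
      rcases h : PySem.Str.pyGet? s i with _ | c
      · rw [PySem.Str.pyGet?_eq, PySem.Chars.pyGet?_eq_listPyGet?,
            PySem.List.pyGet?_eq_none_iff, PySem.Raise.InRange] at h
        push_neg at h
        simp only [PySem.Str.len_eq] at hlt hlo
        omega
      · exact ⟨c, rfl⟩
    rcases hsome with ⟨c, hc⟩
    rw [f_even]
    simp only [hne, if_false, dif_pos hlt, hc]
    simp only [f_even_alt]
    rw [PySem.List.pyRange_one_cons hlt, List.map_cons, List.flatten_cons, ← mk_append_mk,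
        ← String.append_assoc]
    have hchunk : pvChunk s (PySem.Int.floordiv (PySem.Str.len s) 2) i =
        (if i = PySem.Int.floordiv (PySem.Str.len s) 2 - 1 then [c]
         else if PySem.Int.floordiv (PySem.Str.len s) 2 ≤ i then [c, ')'] else [c, '(']) := by
      rw [pvChunk, hc]
      split_ifs <;> rfl
    have hstep := ih (res := if i = PySem.Int.floordiv (PySem.Str.len s) 2 - 1 then res ++ String.ofList [c]
        else if PySem.Int.floordiv (PySem.Str.len s) 2 ≤ i then res ++ String.ofList [c, ')']
        else res ++ String.ofList [c, '(']) (i := i + 1) (by omega) (by omega) (by omega)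
    rw [hstep]
    simp only [f_even_alt]
    rw [hchunk]
    split_ifs <;> rfl

-- ===== VERDICT (by name: the statement is the Claim_ definition above) =====
theorem f_even_spec : Claim_equal_f_even := by
  intro s res i _ hpre
  exact f_even_eq_alt s res i hpre.1 hpre.2
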